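-- pv_equiv track=rewrite | github.com/Ace91Ace/GFG | Difficulty: Medium/Shop in Candy Store/shop-in-candy-store.py | minMaxCandy
-- ===== SOURCE A (Python) =====
-- def minMaxCandy(prices, k):
--     # code here'
--     n = len(prices)
--     prices.sort()
--     mn, mx = 0, 0
--     count = 0
--     for i in range(n):
--         mn += prices[i]
--         count += (1 + k)
--         if count >= n:
--             break
--     count = 0
--     prices = prices[::-1]
--     for i in range(n):
--         mx += prices[i]
--         count += (1 + k)
--         if count >= n:
--             break
--     return [mn, mx]
-- ===== SOURCE B (Python) =====
-- def minMaxCandy(prices, k):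
--     # Sort in place (same observable mutation as A), then pay for exactly
--     # m = ceil(n / (k + 1)) candies: the m cheapest for the minimum cost,
--     # the m most expensive for the maximum cost.
--     prices.sort()
--     n = len(prices)
--     m = (n + k) // (k + 1)
--     return [sum(prices[:m]), sum(prices[n - m:])]
-- ===== Notes on version B (the rewrite author's own statement) =====
-- stated objective: simpler
-- what changed: Both early-breaking counting loops and the list reversal are replaced by a closed-form count of paid candies m = (n + k) // (k + 1) and two slice sums (m cheapest / m most expensive).
-- outside the precondition, e.g. on minMaxCandy([1, 2, 3], -5): A returns [6, 6], B returns [0, 0]; on minMaxCandy([1, 2, 3], -1): A returns [6, 6], B raises ZeroDivisionError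
import Mathlib
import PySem

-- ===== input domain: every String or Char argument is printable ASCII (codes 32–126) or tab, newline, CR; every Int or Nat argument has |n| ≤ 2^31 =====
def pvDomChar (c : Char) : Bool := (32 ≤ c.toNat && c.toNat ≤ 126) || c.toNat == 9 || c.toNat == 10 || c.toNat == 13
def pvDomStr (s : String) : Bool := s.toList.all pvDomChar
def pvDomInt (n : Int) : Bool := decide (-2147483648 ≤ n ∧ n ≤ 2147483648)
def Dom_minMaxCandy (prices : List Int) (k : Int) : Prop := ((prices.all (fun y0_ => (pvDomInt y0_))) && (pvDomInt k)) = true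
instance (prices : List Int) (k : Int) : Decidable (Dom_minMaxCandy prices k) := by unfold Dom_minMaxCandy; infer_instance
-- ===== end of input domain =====

-- B replaces A's two early-breaking counting loops and list reversal by the closed-form
-- paid-candy count m = (n + k) // (k + 1) and two slice sums (objective: simpler).
-- Both A and B sort the argument list in place; the equivalence proved is about the return value.


-- ===== PORT A =====
-- one of A's two identical 'for i in range(n): acc += ps[i]; count += (1+k); if count >= n: break' loops
-- (the index i is always in range(0, n) = range(0, len ps), so pyGetD's default is never taken)
def minMaxCandyLoop (ps : List Int) (k n : Int) (idxs : List Int) (acc count : Int) : Int :=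
  match idxs with
  | [] => acc
  | i :: rest =>
    let acc' := acc + PySem.List.pyGetD ps i 0
    let count' := count + (1 + k)
    if n ≤ count' then acc' else minMaxCandyLoop ps k n rest acc' count'

def minMaxCandy (prices : List Int) (k : Int) : List Int :=
  let n : Int := prices.length
  let prices := PySem.List.sorted prices (fun x => x) false
  let mn := minMaxCandyLoop prices k n (PySem.List.pyRange 0 n 1) 0 0
  -- prices = prices[::-1]  (step -1 ≠ 0, so slice? is always some)
  let prices2 := (PySem.List.slice? prices none none (-1)).getD []
  let mx := minMaxCandyLoop prices2 k n (PySem.List.pyRange 0 n 1) 0 0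
  [mn, mx]

-- ===== PORT B =====
def minMaxCandy_alt (prices : List Int) (k : Int) : List Int :=
  let prices := PySem.List.sorted prices (fun x => x) false
  let n : Int := prices.length
  let m := PySem.Int.floordiv (n + k) (k + 1)
  [(PySem.List.slice prices none (some m)).sum,
   (PySem.List.slice prices (some (n - m)) none).sum]

-- ===== PRECONDITION & SPEC =====
-- Pre_ excludes negative k — a negative count of free candies per purchase is outside the
-- task's natural domain: A degenerately sums the whole list there, while B's ceiling
-- division is meaningless (k = -1 even divides by zero).
def Pre_minMaxCandy (prices : List Int) (k : Int) : Prop := 0 ≤ k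
instance (prices : List Int) (k : Int) : Decidable (Pre_minMaxCandy prices k) := by unfold Pre_minMaxCandy; infer_instance
def pvWitness_minMaxCandy : List Int × Int := ([3, 1, 2], 1)

def Spec_minMaxCandy (prices : List Int) (k : Int) (out : List Int) : Prop := out = minMaxCandy_alt prices k
instance (prices : List Int) (k : Int) (out : List Int) : Decidable (Spec_minMaxCandy prices k out) := by unfold Spec_minMaxCandy; infer_instance

-- ===== CLAIM (what is proved, stated in full; the proofs are below) =====
def Claim_equal_minMaxCandy : Prop := ∀ (prices : List Int) (k : Int), Dom_minMaxCandy prices k → Pre_minMaxCandy prices k → Spec_minMaxCandy prices k (minMaxCandy prices k)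

-- ===== LEMMAS AND PROOFS =====

-- A's loop, entered at index j with count = j*(k+1) still below n, sums the elements
-- j, j+1, …, m-1 of ps, where m = (n + k) // (k + 1) (the break fires once count ≥ n).
theorem minMaxCandyLoop_eq_sum (ps : List Int) (k : Int) (hk : 0 ≤ k) :
    ∀ (j : Nat) (acc : Int), j ≤ ps.length →
    ((j : Int) * (k + 1) < (ps.length : Int)) →
    minMaxCandyLoop ps k (ps.length : Int) (PySem.List.pyRange (j : Int) (ps.length : Int) 1) acc ((j : Int) * (k + 1)) =
      acc + ((ps.drop j).take ((PySem.Int.floordiv ((ps.length : Int) + k) (k + 1)).toNat - j)).sum := by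
  have hk1 : (0:Int) < k + 1 := by omega
  suffices h : ∀ (d j : Nat) (acc : Int), ps.length - j = d → j ≤ ps.length →
      ((j : Int) * (k + 1) < (ps.length : Int)) →
      minMaxCandyLoop ps k (ps.length : Int) (PySem.List.pyRange (j : Int) (ps.length : Int) 1) acc ((j : Int) * (k + 1)) =
      acc + ((ps.drop j).take ((PySem.Int.floordiv ((ps.length : Int) + k) (k + 1)).toNat - j)).sum by
    intro j acc hj hlt; exact h _ j acc rfl hj hlt
  intro d
  induction d with
  | zero =>
    intro j acc hd hj hlt
    have hje : j = ps.length := by omega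
    have h1 : (j:Int) ≤ (j:Int) * (k+1) := le_mul_of_one_le_right (by positivity) (by omega)
    subst hje; linarith
  | succ d ih =>
    intro j acc hd hj hlt
    have hjlt : j < ps.length := by omega
    have hjlt' : (j:Int) < (ps.length:Int) := by exact_mod_cast hjlt
    rw [PySem.List.pyRange_one_cons hjlt']
    simp only [minMaxCandyLoop, PySem.List.pyGetD_natCast, List.getD_eq_getElem ps 0 hjlt]
    have e1 : ((j:Int)+1)*(k+1) = (j:Int)*(k+1) + (k+1) := by ring
    have e2 : ((j:Int)+2)*(k+1) = (j:Int)*(k+1) + 2*(k+1) := by ring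
    by_cases hbr : (ps.length:Int) ≤ (j:Int)*(k+1) + (1+k)
    · rw [if_pos hbr]
      have hm : PySem.Int.floordiv ((ps.length:Int) + k) (k + 1) = (j:Int) + 1 := by
        rw [PySem.Int.floordiv_eq_iff_of_pos hk1]
        constructor <;> linarith
      rw [hm]
      have : ((j:Int) + 1).toNat - j = 1 := by omega
      rw [this, List.drop_eq_getElem_cons hjlt, List.take_succ_cons, List.take_zero]
      simp
    · rw [if_neg hbr]
      have hc : (j:Int)*(k+1) + (1+k) = (((j+1 : Nat)) : Int) * (k+1) := by push_cast; ring
      rw [hc]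
      have hih := ih (j+1) (acc + ps[j]) (by omega) (by omega) (by push_cast; linarith)
      push_cast at hih ⊢
      rw [hih]
      -- m ≥ j + 2
      have hm2 : (j:Int) + 2 ≤ PySem.Int.floordiv ((ps.length:Int) + k) (k + 1) := by
        rw [PySem.Int.le_floordiv_iff_mul_le hk1]
        linarith
      set m := PySem.Int.floordiv ((ps.length:Int) + k) (k + 1) with hmdef
      have hmt : m.toNat - j = (m.toNat - (j+1)) + 1 := by omega
      rw [List.drop_eq_getElem_cons hjlt, hmt, List.take_succ_cons]
      simp; ring

-- ===== VERDICT (by name: the statement is the Claim_ definition above) =====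
theorem minMaxCandy_spec : Claim_equal_minMaxCandy := by
  intro prices k _ hk
  have hk0 : (0:Int) ≤ k := hk
  have hk1 : (0:Int) < k + 1 := by omega
  unfold Spec_minMaxCandy minMaxCandy minMaxCandy_alt
  simp only [PySem.List.slice?_none_none_neg_one, Option.getD_some, PySem.List.length_sorted]
  set l := PySem.List.sorted prices (fun x => x) false with hl
  have hlen : l.length = prices.length := by rw [hl]; exact PySem.List.length_sorted prices (fun x => x) false
  set N := (prices.length : Int) with hN
  set m := PySem.Int.floordiv (N + k) (k+1) with hm
  have hN0 : 0 ≤ N := by positivity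
  have hm0 : 0 ≤ m := by
    rw [hm]
    exact (PySem.Int.le_floordiv_iff_mul_le hk1).mpr (by linarith)
  have hmN : m ≤ N := by
    have := (PySem.Int.floordiv_lt_iff_lt_mul (a := N + k) (q := N + 1) hk1).mpr
      (by nlinarith)
    omega
  rw [PySem.List.slice_to l hm0, PySem.List.slice_from l (by omega : (0:Int) ≤ N - m)]
  rcases Nat.eq_zero_or_pos prices.length with hz | hpos
  · have hlnil : l = [] := List.eq_nil_of_length_eq_zero (by omega)
    have hNz : N = 0 := by rw [hN, hz]; rfl
    rw [hlnil, hNz, PySem.List.pyRange_one_eq_nil (by omega)]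
    simp [minMaxCandyLoop]
  · have hNpos : 0 < N := by rw [hN]; exact_mod_cast hpos
    have h1 := minMaxCandyLoop_eq_sum l k hk0 0 0 (Nat.zero_le _) (by rw [hlen]; simp; exact_mod_cast hpos)
    have h2 := minMaxCandyLoop_eq_sum l.reverse k hk0 0 0 (Nat.zero_le _)
      (by rw [List.length_reverse, hlen]; simp; exact_mod_cast hpos)
    simp only [Nat.cast_zero, zero_mul, zero_add, List.drop_zero, Nat.sub_zero,
      List.length_reverse, hlen] at h1 h2
    rw [h1, h2]
    simp only [List.cons.injEq, and_true]
    constructor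
    · rfl
    · rw [List.take_reverse, List.sum_reverse]
      congr 1
      rw [hlen]
      congr 1
      rw [hN] at hm hmN
      rw [← hm, hN]
      omega
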